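-- pv_equiv track=rewrite | github.com/66363331/openclaw-notes | data/smc_ea_backtest.py | detect_choch
-- ===== SOURCE A (Python) =====
-- def detect_choch(closes, swing_highs, swing_lows):
--     """检测 CHoCH 结构突破"""
--     choch_up = []   # 突破前高 (做多结构)
--     choch_down = [] # 突破前低 (做空结构)
--
--     last_sh = None
--     last_sl = None
--
--     for i in range(1, len(closes)):
--         # 更新最近 swing 点
--         for idx, price in swing_highs:
--             if idx < i:
--                 last_sh = (idx, price)
--         for idx, price in swing_lows:
--             if idx < i:
--                 last_sl = (idx, price)
--
--         # CHoCH 向上突破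
--         if last_sh and closes[i] > last_sh[1] and closes[i-1] <= last_sh[1]:
--             choch_up.append((i, last_sh))
--
--         # CHoCH 向下突破
--         if last_sl and closes[i] < last_sl[1] and closes[i-1] >= last_sl[1]:
--             choch_down.append((i, last_sl))
--
--     return choch_up, choch_down
-- ===== SOURCE B (Python) =====
-- def detect_choch(closes, swing_highs, swing_lows):
--     n = len(closes)
--
--     def events(swings):
--         # ev[e] = highest list position whose swing becomes eligible at bar e
--         ev = [-1] * n
--         for pos, (idx, _price) in enumerate(swings):
--             e = idx + 1
--             if e < 1:
--                 e = 1
--             if e <= n - 1 and pos > ev[e]: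
--                 ev[e] = pos
--         return ev
--
--     ev_h = events(swing_highs)
--     ev_l = events(swing_lows)
--
--     choch_up = []
--     choch_down = []
--     bh = -1
--     bl = -1
--     for i in range(1, n):
--         bh = max(bh, ev_h[i])
--         bl = max(bl, ev_l[i])
--         if bh >= 0:
--             sh = swing_highs[bh]
--             if closes[i] > sh[1] and closes[i - 1] <= sh[1]:
--                 choch_up.append((i, sh))
--         if bl >= 0:
--             sl = swing_lows[bl]
--             if closes[i] < sl[1] and closes[i - 1] >= sl[1]:
--                 choch_down.append((i, sl))
--     return choch_up, choch_down
-- ===== Notes on version B (the rewrite author's own statement) =====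
-- stated objective: faster
-- what changed: Replaces the per-bar rescan of both swing lists with a precomputed event array (eligibility step -> max list position) plus a running prefix-max pointer, so each swing is processed once instead of once per bar.
import Mathlib
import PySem

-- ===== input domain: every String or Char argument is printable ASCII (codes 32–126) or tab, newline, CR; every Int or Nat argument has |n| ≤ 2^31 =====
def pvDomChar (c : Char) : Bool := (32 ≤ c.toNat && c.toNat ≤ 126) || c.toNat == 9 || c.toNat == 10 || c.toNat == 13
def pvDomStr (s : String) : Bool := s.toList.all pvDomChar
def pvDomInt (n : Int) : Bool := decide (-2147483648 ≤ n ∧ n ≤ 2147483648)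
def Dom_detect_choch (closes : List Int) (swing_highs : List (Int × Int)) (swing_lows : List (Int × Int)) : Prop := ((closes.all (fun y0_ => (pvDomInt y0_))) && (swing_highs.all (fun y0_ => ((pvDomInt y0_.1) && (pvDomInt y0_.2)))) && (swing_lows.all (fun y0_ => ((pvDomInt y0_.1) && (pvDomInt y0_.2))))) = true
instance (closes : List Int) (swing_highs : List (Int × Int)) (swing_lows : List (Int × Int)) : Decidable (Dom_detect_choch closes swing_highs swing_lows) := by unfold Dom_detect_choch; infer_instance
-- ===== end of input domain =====

-- B replaces A's per-bar rescan of both swing lists with a precomputed event array plus a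
-- running prefix-max position, processing each swing once (objective: faster).

-- ===== PORT A =====
def detect_choch (closes : List Int) (swing_highs : List (Int × Int)) (swing_lows : List (Int × Int)) : (List (Int × (Int × Int))) × (List (Int × (Int × Int))) :=
  let st := (PySem.List.pyRange 1 (closes.length : Int) 1).foldl
    (fun (st : List (Int × Int × Int) × List (Int × Int × Int) × Option (Int × Int) × Option (Int × Int)) i =>
      let lsh := swing_highs.foldl (fun acc p => if p.1 < i then some p else acc) st.2.2.1
      let lsl := swing_lows.foldl (fun acc p => if p.1 < i then some p else acc) st.2.2.2
      let up := match lsh with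
        | some p => if PySem.List.pyGetD closes i 0 > p.2 ∧ PySem.List.pyGetD closes (i-1) 0 ≤ p.2 then st.1 ++ [(i, p)] else st.1
        | none => st.1
      let dn := match lsl with
        | some p => if PySem.List.pyGetD closes i 0 < p.2 ∧ PySem.List.pyGetD closes (i-1) 0 ≥ p.2 then st.2.1 ++ [(i, p)] else st.2.1
        | none => st.2.1
      (up, dn, lsh, lsl))
    ([], [], none, none)
  (st.1, st.2.1)

-- ===== PORT B =====
-- helper 'events' of Source B: ev[e] = highest list position whose swing becomes eligible at bar e
def pvEvents (n : Int) (swings : List (Int × Int)) : List Int :=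
  (PySem.List.enumerate swings 0).foldl
    (fun ev pe =>
      let e := if pe.2.1 + 1 < 1 then 1 else pe.2.1 + 1
      if e ≤ n - 1 ∧ pe.1 > PySem.List.pyGetD ev e (-1) then PySem.List.pySetD ev e pe.1 else ev)
    (PySem.List.pyRepeat [(-1 : Int)] n)

def detect_choch_alt (closes : List Int) (swing_highs : List (Int × Int)) (swing_lows : List (Int × Int)) : (List (Int × (Int × Int))) × (List (Int × (Int × Int))) :=
  let n : Int := closes.length
  let evh := pvEvents n swing_highs
  let evl := pvEvents n swing_lows
  let st := (PySem.List.pyRange 1 n 1).foldl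
    (fun (st : List (Int × Int × Int) × List (Int × Int × Int) × Int × Int) i =>
      let bh := max st.2.2.1 (PySem.List.pyGetD evh i (-1))
      let bl := max st.2.2.2 (PySem.List.pyGetD evl i (-1))
      let up := if 0 ≤ bh then
          let p := PySem.List.pyGetD swing_highs bh ((0 : Int), (0 : Int))
          if PySem.List.pyGetD closes i 0 > p.2 ∧ PySem.List.pyGetD closes (i-1) 0 ≤ p.2 then st.1 ++ [(i, p)] else st.1
        else st.1
      let dn := if 0 ≤ bl then
          let p := PySem.List.pyGetD swing_lows bl ((0 : Int), (0 : Int))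
          if PySem.List.pyGetD closes i 0 < p.2 ∧ PySem.List.pyGetD closes (i-1) 0 ≥ p.2 then st.2.1 ++ [(i, p)] else st.2.1
        else st.2.1
      (up, dn, bh, bl))
    ([], [], -1, -1)
  (st.1, st.2.1)

-- ===== PRECONDITION & SPEC =====
def Spec_detect_choch (closes : List Int) (swing_highs : List (Int × Int)) (swing_lows : List (Int × Int)) (out : (List (Int × (Int × Int))) × (List (Int × (Int × Int)))) : Prop := out = detect_choch_alt closes swing_highs swing_lows
instance (closes : List Int) (swing_highs : List (Int × Int)) (swing_lows : List (Int × Int)) (out : (List (Int × (Int × Int))) × (List (Int × (Int × Int)))) : Decidable (Spec_detect_choch closes swing_highs swing_lows out) := by unfold Spec_detect_choch; infer_instance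

-- ===== CLAIM (what is proved, stated in full; the proofs are below) =====
def Claim_equal_detect_choch : Prop := ∀ (closes : List Int) (swing_highs : List (Int × Int)) (swing_lows : List (Int × Int)), Dom_detect_choch closes swing_highs swing_lows → Spec_detect_choch closes swing_highs swing_lows (detect_choch closes swing_highs swing_lows)

-- ===== LEMMAS AND PROOFS =====

-- the loop bodies of the two ports, as named functions (definitionally equal to the lambdas above)
def pvStepA (closes : List Int) (swing_highs swing_lows : List (Int × Int))
    (st : List (Int × Int × Int) × List (Int × Int × Int) × Option (Int × Int) × Option (Int × Int)) (i : Int) :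
    List (Int × Int × Int) × List (Int × Int × Int) × Option (Int × Int) × Option (Int × Int) :=
  let lsh := swing_highs.foldl (fun acc p => if p.1 < i then some p else acc) st.2.2.1
  let lsl := swing_lows.foldl (fun acc p => if p.1 < i then some p else acc) st.2.2.2
  let up := match lsh with
    | some p => if PySem.List.pyGetD closes i 0 > p.2 ∧ PySem.List.pyGetD closes (i-1) 0 ≤ p.2 then st.1 ++ [(i, p)] else st.1
    | none => st.1
  let dn := match lsl with
    | some p => if PySem.List.pyGetD closes i 0 < p.2 ∧ PySem.List.pyGetD closes (i-1) 0 ≥ p.2 then st.2.1 ++ [(i, p)] else st.2.1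
    | none => st.2.1
  (up, dn, lsh, lsl)

def pvStepB (closes : List Int) (swing_highs swing_lows : List (Int × Int)) (evh evl : List Int)
    (st : List (Int × Int × Int) × List (Int × Int × Int) × Int × Int) (i : Int) :
    List (Int × Int × Int) × List (Int × Int × Int) × Int × Int :=
  let bh := max st.2.2.1 (PySem.List.pyGetD evh i (-1))
  let bl := max st.2.2.2 (PySem.List.pyGetD evl i (-1))
  let up := if 0 ≤ bh then
      let p := PySem.List.pyGetD swing_highs bh ((0 : Int), (0 : Int))
      if PySem.List.pyGetD closes i 0 > p.2 ∧ PySem.List.pyGetD closes (i-1) 0 ≤ p.2 then st.1 ++ [(i, p)] else st.1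
    else st.1
  let dn := if 0 ≤ bl then
      let p := PySem.List.pyGetD swing_lows bl ((0 : Int), (0 : Int))
      if PySem.List.pyGetD closes i 0 < p.2 ∧ PySem.List.pyGetD closes (i-1) 0 ≥ p.2 then st.2.1 ++ [(i, p)] else st.2.1
    else st.2.1
  (up, dn, bh, bl)

-- reference values: last eligible swing (A's view) and best eligible position (B's view)
def pvLast (i : Int) (l : List (Int × Int)) : Option (Int × Int) :=
  l.reverse.find? (fun p => decide (p.1 < i))

def pvPosMax (P : Int → Bool) (l : List (Int × Int)) : Int :=
  (PySem.List.enumerate l 0).foldl (fun b pe => if P pe.2.1 then max b pe.1 else b) (-1)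

def pvElig (i : Int) : Int → Bool := fun idx => decide (idx < i)
def pvEvP (j : Int) : Int → Bool := fun idx => decide ((if idx + 1 < 1 then 1 else idx + 1) = j)

theorem pvPosMax_append (P : Int → Bool) (l : List (Int × Int)) (p : Int × Int) :
    pvPosMax P (l ++ [p]) = if P p.1 then max (pvPosMax P l) (l.length : Int) else pvPosMax P l := by
  unfold pvPosMax
  rw [PySem.List.enumerate_append, List.foldl_append]
  simp [PySem.List.enumerate_cons, PySem.List.enumerate_nil]


theorem pvPosMax_bounds (P : Int → Bool) (l : List (Int × Int)) :
    -1 ≤ pvPosMax P l ∧ pvPosMax P l ≤ (l.length : Int) - 1 := by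
  induction l using List.reverseRecOn with
  | nil => simp [pvPosMax, PySem.List.enumerate_nil]
  | append_singleton l p ih =>
    rw [pvPosMax_append]
    simp only [List.length_append, List.length_singleton]
    push_cast
    split_ifs <;> omega


theorem pvPosMax_or (P Q : Int → Bool) (l : List (Int × Int)) :
    max (pvPosMax P l) (pvPosMax Q l) = pvPosMax (fun x => P x || Q x) l := by
  induction l using List.reverseRecOn with
  | nil => simp [pvPosMax, PySem.List.enumerate_nil]
  | append_singleton l p ih =>
    rw [pvPosMax_append, pvPosMax_append, pvPosMax_append]
    cases hP : P p.1 <;> cases hQ : Q p.1 <;> simp <;> omega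


theorem pvPosMax_find (P : Int → Bool) (l : List (Int × Int)) :
    (if 0 ≤ pvPosMax P l then some (PySem.List.pyGetD l (pvPosMax P l) ((0 : Int), (0 : Int))) else none)
      = l.reverse.find? (fun p => P p.1) := by
  induction l using List.reverseRecOn with
  | nil => simp [pvPosMax, PySem.List.enumerate_nil]
  | append_singleton l p ih =>
    rw [pvPosMax_append, List.reverse_append]
    obtain ⟨hb1, hb2⟩ := pvPosMax_bounds P l
    cases hP : P p.1 with
    | true =>
      have hmax : max (pvPosMax P l) (l.length : Int) = (l.length : Int) := by omega
      rw [if_pos rfl, hmax, if_pos (by positivity)]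
      have hget : PySem.List.pyGetD (l ++ [p]) ((l.length : Int)) ((0 : Int), (0 : Int)) = p := by
        rw [PySem.List.pyGetD_natCast]
        simp [List.getD_eq_getElem?_getD]
      simp [hget, hP]
    | false =>
      rw [if_neg Bool.false_ne_true]
      by_cases h0 : 0 ≤ pvPosMax P l
      · have hget : PySem.List.pyGetD (l ++ [p]) (pvPosMax P l) ((0 : Int), (0 : Int))
            = PySem.List.pyGetD l (pvPosMax P l) ((0 : Int), (0 : Int)) := by
          rw [PySem.List.pyGetD_eq_getElem (l ++ [p]) _ h0 (by simp; omega),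
              PySem.List.pyGetD_eq_getElem l _ h0 (by omega)]
          rw [List.getElem_append_left]
        rw [if_pos h0, hget]
        simp only [List.reverse_singleton, List.singleton_append, List.find?, hP]
        rw [← ih, if_pos h0]
      · rw [if_neg h0]
        simp only [List.reverse_singleton, List.singleton_append, List.find?, hP]
        rw [← ih, if_neg h0]


theorem pvKeepLast (i : Int) (l : List (Int × Int)) (a0 : Option (Int × Int)) :
    l.foldl (fun acc p => if p.1 < i then some p else acc) a0 = (pvLast i l).elim a0 some := by
  induction l using List.reverseRecOn generalizing a0 with
  | nil => simp [pvLast]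
  | append_singleton l p ih =>
    rw [List.foldl_append]
    by_cases h : p.1 < i <;>
      simp [pvLast, List.reverse_append, h, ih]


theorem pvFoldLen {α : Type} (f : List Int → α → List Int)
    (hf : ∀ ev x, (f ev x).length = ev.length) :
    ∀ (el : List α) (ev : List Int), (el.foldl f ev).length = ev.length := by
  intro el
  induction el with
  | nil => intro ev; rfl
  | cons a t ih => intro ev; rw [List.foldl_cons, ih, hf]

theorem pvEvents_len (n : Int) (l : List (Int × Int)) : (pvEvents n l).length = n.toNat := by
  unfold pvEvents
  rw [pvFoldLen _ (fun ev pe => by dsimp only; split_ifs <;> simp [PySem.List.length_pySetD])]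
  simp [PySem.List.pyRepeat_singleton]

theorem pvEvents_append (n : Int) (l : List (Int × Int)) (p : Int × Int) :
    pvEvents n (l ++ [p]) =
      (if (if p.1 + 1 < 1 then 1 else p.1 + 1) ≤ n - 1 ∧
          (l.length : Int) > PySem.List.pyGetD (pvEvents n l) (if p.1 + 1 < 1 then 1 else p.1 + 1) (-1)
        then PySem.List.pySetD (pvEvents n l) (if p.1 + 1 < 1 then 1 else p.1 + 1) (l.length : Int)
        else pvEvents n l) := by
  unfold pvEvents
  rw [PySem.List.enumerate_append, List.foldl_append]
  simp only [PySem.List.enumerate_cons, PySem.List.enumerate_nil, List.foldl_cons,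
    List.foldl_nil, zero_add]

theorem pvEvents_get (n : Int) (l : List (Int × Int)) (j : Int) (h1 : 1 ≤ j) (h2 : j ≤ n - 1) :
    PySem.List.pyGetD (pvEvents n l) j (-1) = pvPosMax (pvEvP j) l := by
  induction l using List.reverseRecOn generalizing j with
  | nil =>
    unfold pvEvents
    rw [PySem.List.enumerate_nil, List.foldl_nil, PySem.List.pyRepeat_singleton]
    rw [PySem.List.pyGetD_eq_getElem _ _ (by omega) (by simp; omega)]
    simp [pvPosMax, PySem.List.enumerate_nil]
  | append_singleton l p ih =>
    have he01 : (1 : Int) ≤ (if p.1 + 1 < 1 then 1 else p.1 + 1) := by split <;> omega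
    rw [pvEvents_append, pvPosMax_append]
    by_cases he : (if p.1 + 1 < 1 then 1 else p.1 + 1) ≤ n - 1
    · have hlt := (pvPosMax_bounds (pvEvP (if p.1 + 1 < 1 then 1 else p.1 + 1)) l).2
      have hguard : (l.length : Int) >
          PySem.List.pyGetD (pvEvents n l) (if p.1 + 1 < 1 then 1 else p.1 + 1) (-1) := by
        rw [ih _ he01 he]; omega
      rw [if_pos ⟨he, hguard⟩,
        PySem.List.pySetD_of_nonneg _ _ (by omega),
        PySem.List.pyGetD_eq_getElem _ _ (by omega)
          (by rw [List.length_set, pvEvents_len]; omega),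
        List.getElem_set]
      by_cases hj : j = (if p.1 + 1 < 1 then 1 else p.1 + 1)
      · have hP : pvEvP j p.1 = true := by simp [pvEvP]; omega
        rw [if_pos (by omega), hP, if_pos rfl]
        have := (pvPosMax_bounds (pvEvP j) l).2
        omega
      · have hP : pvEvP j p.1 = false := by simp [pvEvP]; omega
        rw [if_neg (by omega), hP, if_neg Bool.false_ne_true]
        rw [← PySem.List.pyGetD_eq_getElem (pvEvents n l) (-1) (by omega)
          (by rw [pvEvents_len]; omega)]
        exact ih j h1 h2
    · have hP : pvEvP j p.1 = false := by simp [pvEvP]; omega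
      rw [if_neg (by tauto), hP, if_neg Bool.false_ne_true]
      exact ih j h1 h2

theorem pvBest_step (l : List (Int × Int)) (t : Nat) :
    max (if t = 0 then -1 else pvPosMax (pvElig t) l) (pvPosMax (pvEvP ((t : Int) + 1)) l)
      = pvPosMax (pvElig ((t : Int) + 1)) l := by
  cases t with
  | zero =>
    have hc : pvEvP ((0 : Nat) + 1 : Int) = pvElig ((0 : Nat) + 1 : Int) := by
      funext x
      simp only [pvEvP, pvElig, Nat.cast_zero, zero_add, decide_eq_decide]
      split <;> omega
    rw [if_pos rfl, hc]
    have := (pvPosMax_bounds (pvElig ((0 : Nat) + 1 : Int)) l).1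
    simp only [Nat.cast_zero] at *
    omega
  | succ k =>
    rw [if_neg (Nat.succ_ne_zero k), pvPosMax_or]
    congr 1
    funext x
    simp only [pvElig, pvEvP, ← Bool.decide_or, decide_eq_decide]
    push_cast
    split <;> omega


theorem pvLast_step (l : List (Int × Int)) (t : Nat) (a0 : Option (Int × Int))
    (h : a0 = if t = 0 then none else pvLast t l) :
    (pvLast ((t : Int) + 1) l).elim a0 some = pvLast ((t : Int) + 1) l := by
  cases hfind : pvLast ((t : Int) + 1) l with
  | some p => simp
  | none =>
    simp only [Option.elim]
    subst h
    cases t with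
    | zero => simp
    | succ k =>
      rw [if_neg (Nat.succ_ne_zero k)]
      unfold pvLast at hfind ⊢
      rw [List.find?_eq_none] at hfind ⊢
      intro x hx
      have := hfind x hx
      simp only [decide_eq_true_eq] at this ⊢
      push_cast at this ⊢
      omega


theorem pvMain (closes : List Int) (sh sl : List (Int × Int)) (t : Nat)
    (ht : (t : Int) ≤ (closes.length : Int) - 1) :
    ((PySem.List.pyRange 1 (1 + (t : Int)) 1).foldl (pvStepA closes sh sl) ([], [], none, none)).1 = ((PySem.List.pyRange 1 (1 + (t : Int)) 1).foldl (pvStepB closes sh sl (pvEvents (closes.length : Int) sh) (pvEvents (closes.length : Int) sl)) ([], [], -1, -1)).1 ∧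
    ((PySem.List.pyRange 1 (1 + (t : Int)) 1).foldl (pvStepA closes sh sl) ([], [], none, none)).2.1 = ((PySem.List.pyRange 1 (1 + (t : Int)) 1).foldl (pvStepB closes sh sl (pvEvents (closes.length : Int) sh) (pvEvents (closes.length : Int) sl)) ([], [], -1, -1)).2.1 ∧
    ((PySem.List.pyRange 1 (1 + (t : Int)) 1).foldl (pvStepA closes sh sl) ([], [], none, none)).2.2.1 = (if t = 0 then none else pvLast t sh) ∧
    ((PySem.List.pyRange 1 (1 + (t : Int)) 1).foldl (pvStepA closes sh sl) ([], [], none, none)).2.2.2 = (if t = 0 then none else pvLast t sl) ∧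
    ((PySem.List.pyRange 1 (1 + (t : Int)) 1).foldl (pvStepB closes sh sl (pvEvents (closes.length : Int) sh) (pvEvents (closes.length : Int) sl)) ([], [], -1, -1)).2.2.1 = (if t = 0 then -1 else pvPosMax (pvElig t) sh) ∧
    ((PySem.List.pyRange 1 (1 + (t : Int)) 1).foldl (pvStepB closes sh sl (pvEvents (closes.length : Int) sh) (pvEvents (closes.length : Int) sl)) ([], [], -1, -1)).2.2.2 = (if t = 0 then -1 else pvPosMax (pvElig t) sl) := by
  induction t with
  | zero =>
    rw [show (1 + ((0 : Nat) : Int)) = 1 by norm_num]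
    rw [PySem.List.pyRange_one_eq_nil (le_refl 1)]
    simp
  | succ k ih =>
    have hk : (k : Int) ≤ (closes.length : Int) - 1 := by push_cast at ht ⊢; omega
    obtain ⟨h1, h2, h3, h4, h5, h6⟩ := ih hk
    have hcast : ((k + 1 : Nat) : Int) = 1 + (k : Int) := by push_cast; ring
    have hsplit : PySem.List.pyRange 1 (1 + ((k + 1 : Nat) : Int)) 1
        = PySem.List.pyRange 1 (1 + (k : Int)) 1 ++ [1 + (k : Int)] := by
      rw [hcast, show (1 + (1 + (k : Int))) = (1 + (k : Int)) + 1 by ring,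
        PySem.List.pyRange_one_succ_right (by omega)]
    rw [hsplit]
    simp only [List.foldl_append, List.foldl_cons, List.foldl_nil]
    rw [hcast]
    simp only [if_neg (Nat.succ_ne_zero k)]
    set i : Int := 1 + (k : Int) with hidef
    set SA := (PySem.List.pyRange 1 i 1).foldl (pvStepA closes sh sl) ([], [], none, none) with hSA
    set SB := (PySem.List.pyRange 1 i 1).foldl
      (pvStepB closes sh sl (pvEvents (closes.length : Int) sh) (pvEvents (closes.length : Int) sl))
      ([], [], -1, -1) with hSB
    have hi2 : i = (k : Int) + 1 := by omega
    have hNA1 : sh.foldl (fun acc p => if p.1 < i then some p else acc) SA.2.2.1 = pvLast i sh := by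
      rw [pvKeepLast, hi2]
      exact pvLast_step sh k _ h3
    have hNA2 : sl.foldl (fun acc p => if p.1 < i then some p else acc) SA.2.2.2 = pvLast i sl := by
      rw [pvKeepLast, hi2]
      exact pvLast_step sl k _ h4
    have hNB1 : max SB.2.2.1 (PySem.List.pyGetD (pvEvents (closes.length : Int) sh) i (-1))
        = pvPosMax (pvElig i) sh := by
      rw [h5, pvEvents_get _ _ i (by omega) (by push_cast at ht; omega), hi2]
      exact pvBest_step sh k
    have hNB2 : max SB.2.2.2 (PySem.List.pyGetD (pvEvents (closes.length : Int) sl) i (-1))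
        = pvPosMax (pvElig i) sl := by
      rw [h6, pvEvents_get _ _ i (by omega) (by push_cast at ht; omega), hi2]
      exact pvBest_step sl k
    have hfindh : (if 0 ≤ pvPosMax (pvElig i) sh then
        some (PySem.List.pyGetD sh (pvPosMax (pvElig i) sh) ((0 : Int), (0 : Int))) else none)
        = pvLast i sh := pvPosMax_find (pvElig i) sh
    have hfindl : (if 0 ≤ pvPosMax (pvElig i) sl then
        some (PySem.List.pyGetD sl (pvPosMax (pvElig i) sl) ((0 : Int), (0 : Int))) else none)
        = pvLast i sl := pvPosMax_find (pvElig i) sl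
    unfold pvStepA pvStepB
    dsimp only
    rw [hNA1, hNA2, hNB1, hNB2]
    have hup : (match pvLast i sh with
        | some p => if PySem.List.pyGetD closes i 0 > p.2 ∧ PySem.List.pyGetD closes (i-1) 0 ≤ p.2
            then SA.1 ++ [(i, p)] else SA.1
        | none => SA.1)
        = (if 0 ≤ pvPosMax (pvElig i) sh then
            if PySem.List.pyGetD closes i 0 > (PySem.List.pyGetD sh (pvPosMax (pvElig i) sh) ((0:Int),(0:Int))).2 ∧
               PySem.List.pyGetD closes (i-1) 0 ≤ (PySem.List.pyGetD sh (pvPosMax (pvElig i) sh) ((0:Int),(0:Int))).2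
            then SB.1 ++ [(i, PySem.List.pyGetD sh (pvPosMax (pvElig i) sh) ((0:Int),(0:Int)))] else SB.1
          else SB.1) := by
      cases hL : pvLast i sh with
      | none =>
        rw [hL] at hfindh
        by_cases hM : 0 ≤ pvPosMax (pvElig i) sh
        · rw [if_pos hM] at hfindh; exact absurd hfindh (by simp)
        · rw [if_neg hM, h1]
      | some p =>
        rw [hL] at hfindh
        by_cases hM : 0 ≤ pvPosMax (pvElig i) sh
        · rw [if_pos hM] at hfindh ⊢
          rw [Option.some.injEq] at hfindh
          rw [hfindh, h1]
        · rw [if_neg hM] at hfindh; exact absurd hfindh (by simp)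
    have hdn : (match pvLast i sl with
        | some p => if PySem.List.pyGetD closes i 0 < p.2 ∧ PySem.List.pyGetD closes (i-1) 0 ≥ p.2
            then SA.2.1 ++ [(i, p)] else SA.2.1
        | none => SA.2.1)
        = (if 0 ≤ pvPosMax (pvElig i) sl then
            if PySem.List.pyGetD closes i 0 < (PySem.List.pyGetD sl (pvPosMax (pvElig i) sl) ((0:Int),(0:Int))).2 ∧
               PySem.List.pyGetD closes (i-1) 0 ≥ (PySem.List.pyGetD sl (pvPosMax (pvElig i) sl) ((0:Int),(0:Int))).2
            then SB.2.1 ++ [(i, PySem.List.pyGetD sl (pvPosMax (pvElig i) sl) ((0:Int),(0:Int)))] else SB.2.1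
          else SB.2.1) := by
      cases hL : pvLast i sl with
      | none =>
        rw [hL] at hfindl
        by_cases hM : 0 ≤ pvPosMax (pvElig i) sl
        · rw [if_pos hM] at hfindl; exact absurd hfindl (by simp)
        · rw [if_neg hM, h2]
      | some p =>
        rw [hL] at hfindl
        by_cases hM : 0 ≤ pvPosMax (pvElig i) sl
        · rw [if_pos hM] at hfindl ⊢
          rw [Option.some.injEq] at hfindl
          rw [hfindl, h2]
        · rw [if_neg hM] at hfindl; exact absurd hfindl (by simp)
    exact ⟨hup, hdn, rfl, rfl, rfl, rfl⟩

-- ===== VERDICT (by name: the statement is the Claim_ definition above) =====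
theorem detect_choch_spec : Claim_equal_detect_choch := by
  unfold Claim_equal_detect_choch Spec_detect_choch
  intro closes sh sl _
  by_cases hn : closes.length = 0
  · unfold detect_choch detect_choch_alt
    rw [show ((closes.length : Int)) = 0 by exact_mod_cast congrArg Nat.cast hn]
    dsimp only
    rw [PySem.List.pyRange_one_eq_nil (by norm_num)]
    rfl
  · have h1 : 1 ≤ closes.length := Nat.pos_of_ne_zero hn
    have hc : (1 + ((closes.length - 1 : Nat) : Int)) = (closes.length : Int) := by
      rw [Nat.cast_sub h1]; push_cast; ring
    have hm := pvMain closes sh sl (closes.length - 1)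
      (by rw [Nat.cast_sub h1]; push_cast; omega)
    rw [hc] at hm
    obtain ⟨e1, e2, -, -, -, -⟩ := hm
    exact Prod.ext_iff.mpr ⟨e1, e2⟩
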